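-- pv_equiv track=rewrite | github.com/jliversi/advent_of_code | 2019/python/d09/intcode.py | parse_op_code
-- ===== SOURCE A (Python) =====
-- def parse_op_code(op_num):
--     num_str = str(op_num)
--     op_code = int(num_str[-2:])
--     i = len(num_str) - 3
--     params = []
--     while i >= 0:
--         params.append(int(num_str[i]))
--         i -= 1
--     return (op_code,) + tuple(params)
-- ===== SOURCE B (Python) =====
-- def parse_op_code(op_num):
--     op_code = op_num % 100
--     rest = op_num // 100
--     params = []
--     while rest > 0:
--         rest, d = divmod(rest, 10)
--         params.append(d)
--     return (op_code,) + tuple(params)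
-- ===== Notes on version B (the rewrite author's own statement) =====
-- stated objective: alternative
-- what changed: B splits the opcode purely arithmetically (op_num % 100 for the opcode, then a divmod-by-10 loop on op_num // 100 for the parameter modes) instead of A's converting the number to a string and indexing/slicing character by character.
-- outside the precondition, e.g. on parse_op_code(-1): A returns (-1,), B returns (99,); on parse_op_code(-5): A returns (-5,), B returns (95,); on parse_op_code(-9): A returns (-9,), B returns (91,)
import Mathlib
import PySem

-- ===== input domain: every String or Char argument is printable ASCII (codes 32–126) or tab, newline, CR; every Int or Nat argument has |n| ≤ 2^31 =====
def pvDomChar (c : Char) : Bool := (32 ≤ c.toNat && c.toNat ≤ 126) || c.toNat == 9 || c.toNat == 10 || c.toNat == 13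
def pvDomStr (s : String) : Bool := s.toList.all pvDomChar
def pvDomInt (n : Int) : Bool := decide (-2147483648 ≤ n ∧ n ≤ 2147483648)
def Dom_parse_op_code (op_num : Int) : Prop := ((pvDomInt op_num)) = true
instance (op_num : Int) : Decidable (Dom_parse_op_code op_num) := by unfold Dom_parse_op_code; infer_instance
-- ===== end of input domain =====

-- B replaces A's build-a-string-and-index-it digit splitting by pure integer
-- arithmetic (op_num % 100 plus a divmod loop on op_num // 100): objective 'alternative'.

-- ===== PORT A =====
-- A's while loop: i runs len-3, len-4, …, 0; ported with fuel k = i + 1,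
-- so the iteration with fuel k+1 reads index k (int(num_str[i]) via getD 0,
-- in range / a digit whenever Pre_ holds).
def parse_op_code_whileA (num_str : List Char) : Nat → List Int → List Int
  | 0, params => params
  | k+1, params =>
      parse_op_code_whileA num_str k
        (params ++ [(PySem.Int.ofChars? [PySem.List.pyGetD num_str (k : Int) ' ']).getD 0])

def parse_op_code (op_num : Int) : List Int :=
  let num_str := PySem.Int.toStr op_num
  let op_code := (PySem.Int.ofStr? (PySem.Str.slice num_str (some (-2)) none)).getD 0
  let i : Int := PySem.Str.len num_str - 3
  let params := parse_op_code_whileA num_str.toList (i + 1).toNat []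
  op_code :: params

-- ===== PORT B =====
-- B's while loop: while rest > 0: rest, d = divmod(rest, 10); params.append(d)
def parse_op_code_whileB (rest : Int) (params : List Int) : List Int :=
  if h : 0 < rest then
    parse_op_code_whileB (PySem.Int.floordiv rest 10) (params ++ [PySem.Int.mod rest 10])
  else params
termination_by rest.toNat
decreasing_by
  simp only [PySem.Int.floordiv_eq_ediv_of_pos (by omega : (0:Int) < 10)]
  omega

def parse_op_code_alt (op_num : Int) : List Int :=
  let op_code := PySem.Int.mod op_num 100
  let rest := PySem.Int.floordiv op_num 100
  op_code :: parse_op_code_whileB rest []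

-- ===== PRECONDITION & SPEC =====
-- Pre_ excludes negative op_num: for op_num ≤ -10 A raises ValueError (int('-')),
-- and for -9 ≤ op_num ≤ -1 A's value (the negative number itself as the opcode) is an
-- accident of sign-preserving string slicing on a corner no Intcode program specifies;
-- B returns Python's nonnegative modulo there.
def Pre_parse_op_code (op_num : Int) : Prop := 0 ≤ op_num
instance (op_num : Int) : Decidable (Pre_parse_op_code op_num) := by unfold Pre_parse_op_code; infer_instance
def pvWitness_parse_op_code : Int := (1002)
def Spec_parse_op_code (op_num : Int) (out : List Int) : Prop := out = parse_op_code_alt op_num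
instance (op_num : Int) (out : List Int) : Decidable (Spec_parse_op_code op_num out) := by unfold Spec_parse_op_code; infer_instance

-- ===== CLAIM (what is proved, stated in full; the proofs are below) =====
def Claim_equal_parse_op_code : Prop := ∀ (op_num : Int), Dom_parse_op_code op_num → Pre_parse_op_code op_num → Spec_parse_op_code op_num (parse_op_code op_num)

-- ===== LEMMAS AND PROOFS =====

-- the decimal character string of a natural number, by structural recursion
def pvDecChars (m : Nat) : List Char :=
  if h : m < 10 then [Nat.digitChar m]
  else pvDecChars (m / 10) ++ [Nat.digitChar (m % 10)]
termination_by m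
decreasing_by exact Nat.div_lt_self (by omega) (by omega)

-- the decimal digits of a natural number, least significant first, as Ints
def pvDigitsLE (m : Nat) : List Int :=
  if h : m = 0 then [] else ((m % 10 : Nat) : Int) :: pvDigitsLE (m / 10)
termination_by m
decreasing_by exact Nat.div_lt_self (by omega) (by omega)

lemma pvDecChars_lt (m : Nat) (h : m < 10) : pvDecChars m = [Nat.digitChar m] := by
  conv_lhs => rw [pvDecChars]
  rw [dif_pos h]

lemma pvDecChars_ge (m : Nat) (h : ¬ m < 10) :
    pvDecChars m = pvDecChars (m / 10) ++ [Nat.digitChar (m % 10)] := by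
  conv_lhs => rw [pvDecChars]
  rw [dif_neg h]

lemma pvDigitsLE_zero : pvDigitsLE 0 = [] := by
  conv_lhs => rw [pvDigitsLE]
  simp

lemma pvDigitsLE_pos (m : Nat) (h : ¬ m = 0) :
    pvDigitsLE m = ((m % 10 : Nat) : Int) :: pvDigitsLE (m / 10) := by
  conv_lhs => rw [pvDigitsLE]
  rw [dif_neg h]

lemma pvToDigitsCore_eq (f : Nat) : ∀ (n : Nat) (acc : List Char), n < f →
    Nat.toDigitsCore 10 f n acc = pvDecChars n ++ acc := by
  induction f with
  | zero => intro n acc h; omega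
  | succ f ih =>
    intro n acc h
    rw [Nat.toDigitsCore]
    by_cases h10 : n < 10
    · have hz : n / 10 = 0 := by omega
      have hm : n % 10 = n := by omega
      simp only [hz, if_pos, hm, pvDecChars_lt n h10]
      rfl
    · have hne : ¬ n / 10 = 0 := by omega
      simp only [hne, ite_false]
      rw [ih (n / 10) _ (by omega), pvDecChars_ge n h10]
      simp

lemma pvToDigits_eq (n : Nat) : Nat.toDigits 10 n = pvDecChars n := by
  have := pvToDigitsCore_eq (n + 1) n [] (by omega)
  simpa [Nat.toDigits] using this

lemma pvToChars_eq (n : Nat) : PySem.Int.toChars (n : Int) = pvDecChars n := by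
  simp [PySem.Int.toChars, pvToDigits_eq]

lemma pvOfVal1 : ∀ d < 10, (PySem.Int.ofChars? [Nat.digitChar d]).getD 0 = (d : Int) := by
  decide

lemma pvOfVal2 : ∀ m < 100,
    PySem.Int.ofChars? [Nat.digitChar (m/10), Nat.digitChar (m%10)] = some (m : Int) := by
  decide

lemma pvDec100 (m : Nat) (h : 100 ≤ m) :
    pvDecChars m = pvDecChars (m / 100) ++ [Nat.digitChar (m / 10 % 10), Nat.digitChar (m % 10)] := by
  rw [pvDecChars_ge m (by omega), pvDecChars_ge (m / 10) (by omega)]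
  have h1 : m / 10 / 10 = m / 100 := by omega
  rw [h1, List.append_assoc]
  rfl

lemma pvDecRev (m : Nat) (hm : 1 ≤ m) :
    (pvDecChars m).reverse.map (fun c => (PySem.Int.ofChars? [c]).getD 0) = pvDigitsLE m := by
  induction m using Nat.strong_induction_on with
  | _ m ih =>
    by_cases h10 : m < 10
    · have hd : m / 10 = 0 := by omega
      have hmod : m % 10 = m := by omega
      rw [pvDecChars_lt m h10, pvDigitsLE_pos m (by omega), hd, hmod, pvDigitsLE_zero]
      simp [pvOfVal1 m h10]
    · rw [pvDecChars_ge m h10, pvDigitsLE_pos m (by omega)]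
      simp only [List.reverse_append, List.reverse_cons, List.reverse_nil, List.nil_append,
        List.cons_append, List.map_cons]
      rw [ih (m / 10) (Nat.div_lt_self (by omega) (by omega)) (by omega)]
      rw [pvOfVal1 (m % 10) (by omega)]

lemma pvWhileA_spec (cs : List Char) : ∀ (k : Nat) (params : List Int), k ≤ cs.length →
    parse_op_code_whileA cs k params =
      params ++ (cs.take k).reverse.map (fun c => (PySem.Int.ofChars? [c]).getD 0) := by
  intro k
  induction k with
  | zero => intro params _; simp [parse_op_code_whileA]
  | succ k ih =>
    intro params hk
    rw [parse_op_code_whileA, ih _ (by omega)]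
    have hlt : k < cs.length := by omega
    have hget : PySem.List.pyGetD cs (k : Int) ' ' = cs[k] := by
      rw [PySem.List.pyGetD_natCast]
      exact List.getD_eq_getElem cs ' ' hlt
    have htak : cs.take (k+1) = cs.take k ++ [cs[k]] := by
      rw [List.take_add_one, List.getElem?_eq_getElem hlt]
      rfl
    rw [hget, htak, List.reverse_append, List.map_append, List.append_assoc]
    rfl

lemma pvWhileB_spec : ∀ (m : Nat) (params : List Int),
    parse_op_code_whileB (m : Int) params = params ++ pvDigitsLE m := by
  intro m
  induction m using Nat.strong_induction_on with
  | _ m ih =>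
    intro params
    rw [parse_op_code_whileB]
    by_cases h0 : m = 0
    · subst h0; simp [pvDigitsLE_zero]
    · rw [dif_pos (by omega : (0:Int) < (m : Int))]
      have hfd : PySem.Int.floordiv (m : Int) 10 = ((m / 10 : Nat) : Int) := by
        rw [PySem.Int.floordiv_eq_ediv_of_pos (by omega)]; omega
      have hmd : PySem.Int.mod (m : Int) 10 = ((m % 10 : Nat) : Int) := by
        rw [PySem.Int.mod_eq_emod_of_pos (by omega)]; omega
      rw [hfd, hmd, ih (m / 10) (Nat.div_lt_self (by omega) (by omega))]
      rw [pvDigitsLE_pos m h0]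
      simp

lemma pvMain (n : Nat) : parse_op_code (n : Int) = parse_op_code_alt (n : Int) := by
  have hcs : (PySem.Int.toStr (n : Int)).toList = pvDecChars n := by
    rw [PySem.Int.toList_toStr, pvToChars_eq]
  have hmod : PySem.Int.mod (n : Int) 100 = ((n % 100 : Nat) : Int) := by
    rw [PySem.Int.mod_eq_emod_of_pos (by omega)]; omega
  have hfd : PySem.Int.floordiv (n : Int) 100 = ((n / 100 : Nat) : Int) := by
    rw [PySem.Int.floordiv_eq_ediv_of_pos (by omega)]; omega
  have hslice : (PySem.Str.slice (PySem.Int.toStr (n : Int)) (some (-2)) none).toList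
      = (pvDecChars n).drop ((pvDecChars n).length - 2) := by
    rw [PySem.Str.toList_slice, PySem.Chars.slice_eq_listSlice, hcs]
    rw [PySem.List.slice_from_neg_ofNat _ 2 (by omega)]
  have hof : PySem.Int.ofStr? (PySem.Str.slice (PySem.Int.toStr (n : Int)) (some (-2)) none)
      = PySem.Int.ofChars? ((pvDecChars n).drop ((pvDecChars n).length - 2)) := by
    rw [PySem.Int.ofStr?, hslice]
  simp only [parse_op_code, parse_op_code_alt, hof, hcs, hmod, hfd, PySem.Str.len_eq]
  rw [pvWhileB_spec]
  by_cases h10 : n < 10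
  · have hL : (pvDecChars n).length = 1 := by rw [pvDecChars_lt n h10]; rfl
    have hfuel : (((pvDecChars n).length : Int) - 3 + 1).toNat = 0 := by omega
    have hdrop : (pvDecChars n).length - 2 = 0 := by omega
    rw [hfuel, parse_op_code_whileA, hdrop, List.drop_zero, pvDecChars_lt n h10,
      pvOfVal1 n h10]
    have hz : n / 100 = 0 := by omega
    rw [hz, pvDigitsLE_zero]
    have : ((n % 100 : Nat) : Int) = (n : Int) := by omega
    rw [this]
    rfl
  · by_cases h100 : n < 100
    · have hval : pvDecChars n = [Nat.digitChar (n / 10), Nat.digitChar (n % 10)] := by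
        rw [pvDecChars_ge n h10, pvDecChars_lt (n / 10) (by omega)]
        rfl
      have hL : (pvDecChars n).length = 2 := by rw [hval]; rfl
      have hfuel : (((pvDecChars n).length : Int) - 3 + 1).toNat = 0 := by omega
      have hdrop : (pvDecChars n).length - 2 = 0 := by omega
      rw [hfuel, parse_op_code_whileA, hdrop, List.drop_zero, hval, pvOfVal2 n h100]
      have hz : n / 100 = 0 := by omega
      rw [hz, pvDigitsLE_zero]
      have : ((n % 100 : Nat) : Int) = (n : Int) := by omega
      simp [this]
    · have hval := pvDec100 n (by omega)
      have hL : (pvDecChars n).length = (pvDecChars (n / 100)).length + 2 := by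
        rw [hval]; simp
      have hdrop : (pvDecChars n).drop ((pvDecChars n).length - 2)
          = [Nat.digitChar (n / 10 % 10), Nat.digitChar (n % 10)] := by
        rw [hval]
        have h2 : (pvDecChars (n / 100)
            ++ [Nat.digitChar (n / 10 % 10), Nat.digitChar (n % 10)]).length - 2
            = (pvDecChars (n / 100)).length := by simp
        rw [h2]
        exact List.drop_left
      have hdig : ([Nat.digitChar (n / 10 % 10), Nat.digitChar (n % 10)] : List Char)
          = [Nat.digitChar ((n % 100) / 10), Nat.digitChar ((n % 100) % 10)] := by
        have e1 : n / 10 % 10 = (n % 100) / 10 := by omega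
        have e2 : n % 10 = (n % 100) % 10 := by omega
        rw [e1, e2]
      rw [hdrop, hdig, pvOfVal2 (n % 100) (by omega)]
      have hfuel : (((pvDecChars n).length : Int) - 3 + 1).toNat
          = (pvDecChars (n / 100)).length := by omega
      rw [hfuel, pvWhileA_spec _ _ _ (by omega)]
      have htake : (pvDecChars n).take ((pvDecChars (n / 100)).length) = pvDecChars (n / 100) := by
        conv_lhs => rw [hval]
        exact List.take_left
      rw [htake, pvDecRev (n / 100) (by omega)]
      rfl

-- ===== VERDICT (by name: the statement is the Claim_ definition above) =====
theorem parse_op_code_spec : Claim_equal_parse_op_code := by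
  intro op_num _ hpre
  unfold Spec_parse_op_code
  have h : op_num = ((op_num.toNat : Nat) : Int) := (Int.toNat_of_nonneg hpre).symm
  rw [h]
  exact pvMain op_num.toNat
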